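-- pv_equiv track=rewrite | github.com/eric-brandao/insitu_sim_python | insitu/receivers.py | form_new_triangles
-- ===== SOURCE A (Python) =====
-- def form_new_triangles(open_edges, equator_edges):
--     """Form new triangles using open edges and equator edges."""
--     new_triangles = []
--     used_edges = set()
--
--     for eq_edge in equator_edges:
--         if eq_edge in used_edges:
--             continue
--         v1, v2 = eq_edge
--         # Find two open edges that connect to v1 and v2
--         connecting_edges = [
--             edge for edge in open_edges if v1 in edge or v2 in edge and edge != eq_edge
--         ]
--         if len(connecting_edges) >= 2:
--             edge1, edge2 = connecting_edges[:2]
--             v3 = (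
--                 edge1[0] if edge1[0] != v1 and edge1[0] != v2 else edge1[1]
--             )  # Vertex not in eq_edge
--             new_triangles.append([v1, v2, v3])
--             used_edges.add(eq_edge)
--             used_edges.update(connecting_edges)
--
--     return new_triangles
-- ===== SOURCE B (Python) =====
-- def form_new_triangles(open_edges, equator_edges):
--     """Form new triangles using open edges and equator edges."""
--     # Index open edges by vertex (position-ordered), so the connecting edges
--     # of each equator edge are found by lookup + ordered merge, not a scan.
--     index = {}
--     for pos, edge in enumerate(open_edges):
--         a, b = edge
--         index.setdefault(a, []).append((pos, edge))
--         if b != a: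
--             index.setdefault(b, []).append((pos, edge))
--
--     new_triangles = []
--     used_edges = set()
--     for eq_edge in equator_edges:
--         if eq_edge in used_edges:
--             continue
--         v1, v2 = eq_edge
--         connecting_edges = [e for _, e in _merge(index.get(v1, []), index.get(v2, []))]
--         if len(connecting_edges) >= 2:
--             edge1 = connecting_edges[0]
--             v3 = edge1[0] if edge1[0] != v1 and edge1[0] != v2 else edge1[1]
--             new_triangles.append([v1, v2, v3])
--             used_edges.add(eq_edge)
--             used_edges.update(connecting_edges)
--     return new_triangles
--
--
-- def _merge(xs, ys):
--     """Merge two position-sorted (pos, edge) lists, dropping duplicate positions."""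
--     i = j = 0
--     out = []
--     while i < len(xs) and j < len(ys):
--         if xs[i][0] < ys[j][0]:
--             out.append(xs[i]); i += 1
--         elif ys[j][0] < xs[i][0]:
--             out.append(ys[j]); j += 1
--         else:
--             out.append(xs[i]); i += 1; j += 1
--     out.extend(xs[i:])
--     out.extend(ys[j:])
--     return out
-- ===== Notes on version B (the rewrite author's own statement) =====
-- stated objective: faster
-- what changed: B builds a vertex->(position, edge) index of open_edges once and finds each equator edge's connecting edges by two dictionary lookups merged in position order, instead of A's full scan of open_edges for every equator edge.
import Mathlib
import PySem

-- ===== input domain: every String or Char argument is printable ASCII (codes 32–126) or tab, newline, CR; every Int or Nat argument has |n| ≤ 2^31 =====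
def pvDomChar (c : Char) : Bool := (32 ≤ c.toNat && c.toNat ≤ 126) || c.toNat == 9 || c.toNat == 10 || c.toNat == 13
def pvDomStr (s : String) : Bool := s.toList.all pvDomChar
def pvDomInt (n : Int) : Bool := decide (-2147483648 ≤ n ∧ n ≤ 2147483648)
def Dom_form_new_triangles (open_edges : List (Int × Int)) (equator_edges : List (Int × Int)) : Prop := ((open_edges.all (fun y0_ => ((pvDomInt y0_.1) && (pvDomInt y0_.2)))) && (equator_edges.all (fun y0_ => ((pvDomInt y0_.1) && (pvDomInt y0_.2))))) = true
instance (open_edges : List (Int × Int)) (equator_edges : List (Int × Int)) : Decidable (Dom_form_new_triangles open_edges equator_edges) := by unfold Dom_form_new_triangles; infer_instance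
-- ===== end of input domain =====

-- B replaces A's per-equator-edge scan of all open edges by a vertex→(position, edge) index
-- built once, looking up and merging the two position-ordered lists per equator edge (objective: faster).

-- ===== PORT A =====
def form_new_triangles (open_edges : List (Int × Int)) (equator_edges : List (Int × Int)) : List (List Int) :=
  (equator_edges.foldl (fun (st : List (List Int) × PySem.Set (Int × Int)) eq_edge =>
      if PySem.Set.contains st.2 eq_edge then st
      else
        let v1 := eq_edge.1
        let v2 := eq_edge.2
        let connecting_edges := open_edges.filter (fun edge =>
          (v1 == edge.1 || v1 == edge.2) || ((v2 == edge.1 || v2 == edge.2) && edge != eq_edge))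
        match connecting_edges with
        | edge1 :: _edge2 :: _ =>
            let v3 := if edge1.1 ≠ v1 ∧ edge1.1 ≠ v2 then edge1.1 else edge1.2
            (st.1 ++ [[v1, v2, v3]], PySem.Set.update (PySem.Set.add st.2 eq_edge) connecting_edges)
        | _ => st)
    ([], PySem.Set.empty)).1

-- ===== PORT B =====
-- _merge from Source B: merge two position-sorted (pos, edge) lists, dropping duplicate positions
def pvMerge : List (Int × (Int × Int)) → List (Int × (Int × Int)) → List (Int × (Int × Int))
  | [], ys => ys
  | x :: xs, [] => x :: xs
  | x :: xs, y :: ys =>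
      if x.1 < y.1 then x :: pvMerge xs (y :: ys)
      else if y.1 < x.1 then y :: pvMerge (x :: xs) ys
      else x :: pvMerge xs ys

-- Source B's index-building loop: vertex → list of (position, edge), in input order
def pvBuildIndex (open_edges : List (Int × Int)) : PySem.Dict Int (List (Int × (Int × Int))) :=
  (PySem.List.enumerate open_edges 0).foldl (fun d pe =>
      let d1 := d.insert pe.2.1 (d.getD pe.2.1 [] ++ [pe])
      if pe.2.2 ≠ pe.2.1 then d1.insert pe.2.2 (d1.getD pe.2.2 [] ++ [pe]) else d1)
    PySem.Dict.empty

def form_new_triangles_alt (open_edges : List (Int × Int)) (equator_edges : List (Int × Int)) : List (List Int) :=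
  let index := pvBuildIndex open_edges
  (equator_edges.foldl (fun (st : List (List Int) × PySem.Set (Int × Int)) eq_edge =>
      if PySem.Set.contains st.2 eq_edge then st
      else
        let v1 := eq_edge.1
        let v2 := eq_edge.2
        let connecting_edges := (pvMerge (index.getD v1 []) (index.getD v2 [])).map (·.2)
        if connecting_edges.length ≥ 2 then
          let edge1 := PySem.List.pyGetD connecting_edges 0 (0, 0)  -- connecting_edges[0]; guarded by the length test
          let v3 := if edge1.1 ≠ v1 ∧ edge1.1 ≠ v2 then edge1.1 else edge1.2
          (st.1 ++ [[v1, v2, v3]], PySem.Set.update (PySem.Set.add st.2 eq_edge) connecting_edges)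
        else st)
    ([], PySem.Set.empty)).1

-- ===== PRECONDITION & SPEC =====
def Spec_form_new_triangles (open_edges : List (Int × Int)) (equator_edges : List (Int × Int)) (out : List (List Int)) : Prop := out = form_new_triangles_alt open_edges equator_edges
instance (open_edges : List (Int × Int)) (equator_edges : List (Int × Int)) (out : List (List Int)) : Decidable (Spec_form_new_triangles open_edges equator_edges out) := by unfold Spec_form_new_triangles; infer_instance

-- ===== CLAIM (what is proved, stated in full; the proofs are below) =====
def Claim_equal_form_new_triangles : Prop := ∀ (open_edges : List (Int × Int)) (equator_edges : List (Int × Int)), Dom_form_new_triangles open_edges equator_edges → Spec_form_new_triangles open_edges equator_edges (form_new_triangles open_edges equator_edges)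

-- ===== LEMMAS AND PROOFS =====

-- the index lists each vertex's (position, edge) pairs: exactly the enumerate entries whose edge contains it
theorem pvBuildIndex_getD_aux (L : List (Int × (Int × Int)))
    (d : PySem.Dict Int (List (Int × (Int × Int)))) (v : Int) :
    (L.foldl (fun d pe =>
      let d1 := d.insert pe.2.1 (d.getD pe.2.1 [] ++ [pe])
      if pe.2.2 ≠ pe.2.1 then d1.insert pe.2.2 (d1.getD pe.2.2 [] ++ [pe]) else d1) d).getD v []
    = d.getD v [] ++ L.filter (fun pe => v == pe.2.1 || v == pe.2.2) := by
  induction L generalizing d with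
  | nil => simp
  | cons pe t ih =>
      simp only [List.foldl_cons, List.filter_cons, ih]
      by_cases hba : pe.2.2 = pe.2.1 <;>
        by_cases h1 : v = pe.2.1 <;> by_cases h2 : v = pe.2.2 <;>
          simp_all [PySem.Dict.getD_insert]

theorem pvBuildIndex_getD (open_edges : List (Int × Int)) (v : Int) :
    (pvBuildIndex open_edges).getD v []
      = (PySem.List.enumerate open_edges 0).filter (fun pe => v == pe.2.1 || v == pe.2.2) := by
  unfold pvBuildIndex
  rw [pvBuildIndex_getD_aux]
  simp

theorem pvMerge_cons_left (x : Int × (Int × Int)) (xs ys : List (Int × (Int × Int)))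
    (h : ∀ y ∈ ys, x.1 < y.1) : pvMerge (x :: xs) ys = x :: pvMerge xs ys := by
  cases ys with
  | nil => cases xs <;> simp [pvMerge]
  | cons y t =>
      have hx : x.1 < y.1 := h y (by simp)
      simp [pvMerge, hx]

theorem pvMerge_cons_right (y : Int × (Int × Int)) (xs ys : List (Int × (Int × Int)))
    (h : ∀ x ∈ xs, y.1 < x.1) : pvMerge xs (y :: ys) = y :: pvMerge xs ys := by
  cases xs with
  | nil => simp [pvMerge]
  | cons x t =>
      have hy : y.1 < x.1 := h x (by simp)
      simp [pvMerge, hy, not_lt_of_gt hy]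

-- merging the filtered sublists of a strictly position-increasing list is filtering by the disjunction
theorem pvMerge_filter (L : List (Int × (Int × Int))) (p q : (Int × (Int × Int)) → Bool)
    (hL : L.Pairwise (fun a b => a.1 < b.1)) :
    pvMerge (L.filter p) (L.filter q) = L.filter (fun x => p x || q x) := by
  induction L with
  | nil => simp [pvMerge]
  | cons z t ih =>
      have hz : ∀ w ∈ t, z.1 < w.1 := by
        intro w hw; exact (List.pairwise_cons.mp hL).1 w hw
      have ht := (List.pairwise_cons.mp hL).2
      have hsub : ∀ (r : (Int × (Int × Int)) → Bool), ∀ w ∈ t.filter r, z.1 < w.1 := by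
        intro r w hw; exact hz w (List.mem_of_mem_filter hw)
      by_cases hp : p z <;> by_cases hq : q z <;>
        simp only [List.filter_cons, hp, hq, if_pos, if_neg, Bool.false_or,
          Bool.or_false, Bool.or_self, Bool.not_eq_true] <;>
        simp_all [pvMerge, pvMerge_cons_left _ _ _ (hsub q), pvMerge_cons_right _ _ _ (hsub p)]

theorem map_snd_filter_enumerate (l : List (Int × Int)) (s : Int) (pred : (Int × Int) → Bool) :
    ((PySem.List.enumerate l s).filter (fun pe => pred pe.2)).map (·.2) = l.filter pred := by
  induction l generalizing s with
  | nil => simp [PySem.List.enumerate_nil]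
  | cons x t ih =>
      rw [PySem.List.enumerate_cons]
      by_cases hx : pred x <;> simp [hx, ih]

-- A's connecting condition: the 'edge != eq_edge' clause is vacuous (such an edge contains v1)
theorem pred_eq (eq_edge edge : Int × Int) :
    ((eq_edge.1 == edge.1 || eq_edge.1 == edge.2) ||
      ((eq_edge.2 == edge.1 || eq_edge.2 == edge.2) && edge != eq_edge))
    = ((eq_edge.1 == edge.1 || eq_edge.1 == edge.2) || (eq_edge.2 == edge.1 || eq_edge.2 == edge.2)) := by
  by_cases h : edge = eq_edge
  · subst h; simp
  · rw [bne_iff_ne.mpr h, Bool.and_true]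

-- per equator edge, B's lookup-and-merge list equals A's scan of open_edges
theorem connecting_eq (open_edges : List (Int × Int)) (eq_edge : Int × Int) :
    (pvMerge ((pvBuildIndex open_edges).getD eq_edge.1 [])
             ((pvBuildIndex open_edges).getD eq_edge.2 [])).map (·.2)
    = open_edges.filter (fun edge =>
        (eq_edge.1 == edge.1 || eq_edge.1 == edge.2) ||
          ((eq_edge.2 == edge.1 || eq_edge.2 == edge.2) && edge != eq_edge)) := by
  rw [List.filter_congr (fun edge _ => pred_eq eq_edge edge),
    pvBuildIndex_getD, pvBuildIndex_getD,
    pvMerge_filter _ _ _ (PySem.List.pairwise_lt_enumerate open_edges 0)]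
  exact map_snd_filter_enumerate open_edges 0
    (fun edge => (eq_edge.1 == edge.1 || eq_edge.1 == edge.2) || (eq_edge.2 == edge.1 || eq_edge.2 == edge.2))

-- A's two-cons match and B's length-2 test with [0] agree on any connecting list
theorem step_eq (st : List (List Int) × PySem.Set (Int × Int)) (eq_edge : Int × Int)
    (c : List (Int × Int)) :
    (match c with
     | edge1 :: _edge2 :: _ =>
        (st.1 ++ [[eq_edge.1, eq_edge.2,
            if edge1.1 ≠ eq_edge.1 ∧ edge1.1 ≠ eq_edge.2 then edge1.1 else edge1.2]],
          PySem.Set.update (PySem.Set.add st.2 eq_edge) c)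
     | _ => st)
    = (if c.length ≥ 2 then
        (st.1 ++ [[eq_edge.1, eq_edge.2,
            if (PySem.List.pyGetD c 0 (0, 0)).1 ≠ eq_edge.1 ∧ (PySem.List.pyGetD c 0 (0, 0)).1 ≠ eq_edge.2
              then (PySem.List.pyGetD c 0 (0, 0)).1 else (PySem.List.pyGetD c 0 (0, 0)).2]],
          PySem.Set.update (PySem.Set.add st.2 eq_edge) c)
       else st) := by
  rcases c with _ | ⟨e1, _ | ⟨e2, t⟩⟩ <;> simp [PySem.List.pyGetD_zero_cons]

-- ===== VERDICT (by name: the statement is the Claim_ definition above) =====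
theorem form_new_triangles_spec : Claim_equal_form_new_triangles := by
  intro open_edges equator_edges _
  unfold Spec_form_new_triangles form_new_triangles form_new_triangles_alt
  congr 2
  funext st eq_edge
  by_cases hu : PySem.Set.contains st.2 eq_edge = true
  · rw [if_pos hu, if_pos hu]
  · rw [if_neg hu, if_neg hu]
    simp only [connecting_eq open_edges eq_edge]
    exact step_eq st eq_edge _
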